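-- pv_equiv track=rewrite | github.com/andrewhop/AdventOfCode | 2022/day-14/day14.py | input_to_grid
-- ===== SOURCE A (Python) =====
-- AIR = "."
--
-- ROCK = "#"
--
-- SHIFT = 0
--
-- def input_to_grid(lines):
--     grid = []
--     biggest_column = 0
--     for line in lines:
--         points = line.split(" -> ")
--         for start, end in zip(points, points[1:]):
--             start_column, start_row = [int(x) for x in start.split(',')]
--             end_column, end_row = [int(x) for x in end.split(',')]
--             start_column -= SHIFT
--             end_column -= SHIFT
--             biggest_column = max(biggest_column, start_column, end_column)
--             if start_row != end_row:
--                 start_row, end_row = [start_row, end_row] if start_row < end_row else [end_row, start_row]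
--
--                 for row in range(start_row, end_row + 1):
--                     while row >= len(grid):
--                         grid.append([])
--                     while start_column >= len(grid[row]):
--                         grid[row].append(AIR)
--                     grid[row][start_column] = ROCK
--             if start_column != end_column:
--                 start_column, end_column = [start_column, end_column] if start_column < end_column else [end_column, start_column]
--                 for column in range(start_column, end_column + 1):
--                     while start_row >= len(grid):
--                         grid.append([])
--                     while column >= len(grid[start_row]):
--                         grid[start_row].append(AIR)
--                     grid[start_row][column] = ROCK
--     biggest_column += 500
--     grid.append([])
--     grid.append([])
--     # Fill grid
--     for row in grid:
--         while len(row) <= biggest_column: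
--             row.append(AIR)
--
--     return grid
-- ===== SOURCE B (Python) =====
-- AIR = "."
--
-- ROCK = "#"
--
-- SHIFT = 0
--
-- def input_to_grid(lines):
--     # Stage 1: parse every line into its list of consecutive segments (flat list).
--     segments = []
--     for line in lines:
--         points = line.split(" -> ")
--         for a, b in zip(points, points[1:]):
--             c1, r1 = [int(v) for v in a.split(',')]
--             c2, r2 = [int(v) for v in b.split(',')]
--             segments.append(((c1, r1), (c2, r2)))
--     # Stage 2: biggest column over all segment endpoints.
--     biggest = 0
--     for (c1, _), (c2, _) in segments:
--         biggest = max(biggest, c1, c2)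
--     # Stage 3: expand each segment into its rock cells (L-shape for diagonals,
--     # matching the two independent range draws) and collect them in a set.
--     rocks = set()
--     for (c1, r1), (c2, r2) in segments:
--         cells = []
--         if r1 != r2:
--             cells += [(r, c1) for r in range(min(r1, r2), max(r1, r2) + 1)]
--         if c1 != c2:
--             cells += [(min(r1, r2), c) for c in range(min(c1, c2), max(c1, c2) + 1)]
--         rocks.update(cells)
--     # Stage 4: allocate the full grid at once and place the rocks.
--     height = (max(r for r, _ in rocks) + 1 if rocks else 0) + 2
--     width = biggest + 500 + 1
--     grid = [[AIR] * width for _ in range(height)]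
--     for r, c in rocks:
--         grid[r][c] = ROCK
--     return grid
-- ===== Notes on version B (the rewrite author's own statement) =====
-- stated objective: alternative
-- what changed: A grows a ragged grid lazily while drawing (append-on-demand rows/cells, in-place writes, final padding pass); B runs staged passes: flatten all lines into one parsed segment list, take the max column over it, expand each segment into its rock-cell set, then allocate the full uniform grid in one shot and place the rocks.
-- outside the precondition, e.g. on input_to_grid(['0,-5 -> 0,-4']): A raises IndexError, B raises IndexError; on input_to_grid(['x,y -> 1,2']): A raises ValueError, B raises ValueError
import Mathlib
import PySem

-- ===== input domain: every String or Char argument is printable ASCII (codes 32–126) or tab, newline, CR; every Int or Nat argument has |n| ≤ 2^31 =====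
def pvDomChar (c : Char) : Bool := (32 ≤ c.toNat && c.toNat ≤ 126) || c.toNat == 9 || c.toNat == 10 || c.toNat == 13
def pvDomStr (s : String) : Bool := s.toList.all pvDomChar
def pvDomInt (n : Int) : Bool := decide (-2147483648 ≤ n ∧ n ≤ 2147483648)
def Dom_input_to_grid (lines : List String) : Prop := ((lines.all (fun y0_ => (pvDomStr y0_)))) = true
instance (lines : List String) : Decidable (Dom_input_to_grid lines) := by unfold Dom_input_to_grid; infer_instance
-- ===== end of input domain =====

-- B replaces A's lazily-grown ragged grid (grow-on-write while drawing, pad at the end) by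
-- staged passes: flatten all lines into one parsed segment list, take the max column over it,
-- expand each segment into its rock-cell set, then allocate the full uniform grid in one shot
-- and place the rocks (objective: alternative decomposition; return value only).

-- ===== PORT A =====
def pyAIR : String := "."
def pyROCK : String := "#"
def pySHIFT : Int := 0

def parseSegA (s e : String) : Option (Int × Int × Int × Int) :=
  match (PySem.Str.split? s ",").getD [], (PySem.Str.split? e ",").getD [] with
  | [x1, y1], [x2, y2] =>
    match PySem.Int.ofStr? x1, PySem.Int.ofStr? y1, PySem.Int.ofStr? x2, PySem.Int.ofStr? y2 with
    | some sc, some sr, some ec, some er => some (sc, sr, ec, er)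
    | _, _, _, _ => none
  | _, _ => none

def drawCellA (grid : List (List String)) (r c : Int) : List (List String) :=
  let grid := grid ++ List.replicate ((r + 1).toNat - grid.length) []
  let rowL := grid.getD r.toNat []
  let rowL := rowL ++ List.replicate ((c + 1).toNat - rowL.length) pyAIR
  grid.set r.toNat (rowL.set c.toNat pyROCK)

def segStepA (st : List (List String) × Int) (pq : String × String) : List (List String) × Int :=
  match parseSegA pq.1 pq.2 with
  | none => st
  | some (sc0, sr, ec0, er) =>
    let sc := sc0 - pySHIFT
    let ec := ec0 - pySHIFT
    let biggest := max (max st.2 sc) ec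
    let grid := st.1
    let rp := if sr < er then (sr, er) else (er, sr)
    let grid := if sr ≠ er then
        (PySem.List.pyRange rp.1 (rp.2 + 1) 1).foldl (fun g row => drawCellA g row sc) grid
      else grid
    let grid := if sc ≠ ec then
        let cp := if sc < ec then (sc, ec) else (ec, sc)
        (PySem.List.pyRange cp.1 (cp.2 + 1) 1).foldl (fun g col => drawCellA g rp.1 col) grid
      else grid
    (grid, biggest)

def lineStepA (st : List (List String) × Int) (line : String) : List (List String) × Int :=
  let points := (PySem.Str.split? line " -> ").getD []
  (points.zip points.tail).foldl segStepA st

def input_to_grid (lines : List String) : List (List String) :=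
  let st := lines.foldl lineStepA ([], 0)
  let biggest := st.2 + 500
  let grid := st.1 ++ [[], []]
  grid.map (fun row => row ++ List.replicate ((biggest + 1).toNat - row.length) pyAIR)


-- ===== PORT B =====
def parsePoint? (s : String) : Option (Int × Int) :=
  match (PySem.Str.split? s ",").getD [] with
  | [x, y] =>
    match PySem.Int.ofStr? x, PySem.Int.ofStr? y with
    | some a, some b => some (a, b)
    | _, _ => none
  | _ => none

-- Stage 1 of Source B: one flat list of parsed consecutive segments over all lines.
def lineSegs (line : String) : List ((Int × Int) × (Int × Int)) :=
  let pts := (PySem.Str.split? line " -> ").getD []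
  (pts.zip pts.tail).foldl (fun acc pq =>
    acc ++ (match parsePoint? pq.1, parsePoint? pq.2 with
            | some p, some q => [(p, q)]
            | _, _ => [])) []

def allSegs (lines : List String) : List ((Int × Int) × (Int × Int)) :=
  lines.foldl (fun acc line => acc ++ lineSegs line) []

-- Stage 2 of Source B: biggest column over all segment endpoints.
def biggestCol (segs : List ((Int × Int) × (Int × Int))) : Int :=
  segs.foldl (fun b s => max (max b s.1.1) s.2.1) 0

-- Stage 3 of Source B: the rock cells of one segment (vertical part, then horizontal part).
def segCells (s : (Int × Int) × (Int × Int)) : List (Int × Int) :=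
  (if s.1.2 ≠ s.2.2 then
      (PySem.List.pyRange (min s.1.2 s.2.2) (max s.1.2 s.2.2 + 1) 1).map (fun r => (r, s.1.1))
    else []) ++
  (if s.1.1 ≠ s.2.1 then
      (PySem.List.pyRange (min s.1.1 s.2.1) (max s.1.1 s.2.1 + 1) 1).map (fun c => (min s.1.2 s.2.2, c))
    else [])

-- Stage 4 of Source B: place one rock in the preallocated grid.
def setRockB (grid : List (List String)) (p : Int × Int) : List (List String) :=
  grid.set p.1.toNat ((grid.getD p.1.toNat []).set p.2.toNat pyROCK)

def input_to_grid_alt (lines : List String) : List (List String) :=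
  let segs := allSegs lines
  let rocks := segs.foldl (fun S s => (segCells s).foldl PySem.Set.add S) (PySem.Set.ofList [])
  let height := (match PySem.List.max? rocks (fun p => p.1) with
                 | some m => m.1 + 1
                 | none => 0) + 2
  let width := biggestCol segs + 500 + 1
  rocks.foldl setRockB (List.replicate height.toNat (List.replicate width.toNat pyAIR))


-- ===== PRECONDITION & SPEC =====
-- one point "c,r": exactly two comma-separated fields, both parsing as nonnegative ints
def okPointPre (p : String) : Bool :=
  match (PySem.Str.split? p ",").getD [] with
  | [x, y] =>
    match PySem.Int.ofStr? x, PySem.Int.ofStr? y with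
    | some a, some b => decide (0 ≤ a ∧ 0 ≤ b)
    | _, _ => false
  | _ => false

-- Pre_ excludes lines whose points do not parse as exactly two ints (A raises ValueError there) and
-- segments with a negative coordinate, on which A either raises IndexError or places rocks through
-- Python's negative-index wraparound, an artefact of A's in-place list writes.
def Pre_input_to_grid (lines : List String) : Prop :=
  ∀ line ∈ lines, 2 ≤ ((PySem.Str.split? line " -> ").getD []).length →
    ∀ p ∈ (PySem.Str.split? line " -> ").getD [], okPointPre p = true

instance (lines : List String) : Decidable (Pre_input_to_grid lines) := by
  unfold Pre_input_to_grid; infer_instance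

def pvWitness_input_to_grid : List String := ["3,1 -> 3,3 -> 1,3", "0,0"]

def Spec_input_to_grid (lines : List String) (out : List (List String)) : Prop := out = input_to_grid_alt lines
instance (lines : List String) (out : List (List String)) : Decidable (Spec_input_to_grid lines out) := by unfold Spec_input_to_grid; infer_instance

-- ===== CLAIM (what is proved, stated in full; the proofs are below) =====
def Claim_equal_input_to_grid : Prop := ∀ (lines : List String), Dom_input_to_grid lines → Pre_input_to_grid lines → Spec_input_to_grid lines (input_to_grid lines)

-- ===== LEMMAS AND PROOFS =====

-- A's per-segment action on the (grid, biggest) state, for an already-parsed segment.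
def segDraw (st : List (List String) × Int) (s : (Int × Int) × (Int × Int)) : List (List String) × Int :=
  let sc := s.1.1 - pySHIFT
  let sr := s.1.2
  let ec := s.2.1 - pySHIFT
  let er := s.2.2
  let biggest := max (max st.2 sc) ec
  let rp := if sr < er then (sr, er) else (er, sr)
  let grid := if sr ≠ er then
      (PySem.List.pyRange rp.1 (rp.2 + 1) 1).foldl (fun g row => drawCellA g row sc) st.1
    else st.1
  let grid := if sc ≠ ec then
      let cp := if sc < ec then (sc, ec) else (ec, sc)
      (PySem.List.pyRange cp.1 (cp.2 + 1) 1).foldl (fun g col => drawCellA g rp.1 col) grid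
    else grid
  (grid, biggest)

def segOf (pq : String × String) : List ((Int × Int) × (Int × Int)) :=
  match parsePoint? pq.1, parsePoint? pq.2 with
  | some p, some q => [(p, q)]
  | _, _ => []

theorem parseSegA_eq (s e : String) :
    parseSegA s e = match parsePoint? s, parsePoint? e with
      | some p, some q => some (p.1, p.2, q.1, q.2)
      | _, _ => none := by
  unfold parseSegA parsePoint?
  rcases hs : (PySem.Str.split? s ",").getD [] with _ | ⟨x1, _ | ⟨y1, _ | _⟩⟩ <;>
    rcases he : (PySem.Str.split? e ",").getD [] with _ | ⟨x2, _ | ⟨y2, _ | _⟩⟩ <;>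
    try rfl
  all_goals try dsimp only
  all_goals try (rcases hx1 : PySem.Int.ofStr? x1 with _ | a <;>
    rcases hy1 : PySem.Int.ofStr? y1 with _ | b <;> try rfl)
  all_goals (rcases hx2 : PySem.Int.ofStr? x2 with _ | c <;>
    rcases hy2 : PySem.Int.ofStr? y2 with _ | d <;> rfl)

theorem segStepA_eq (st : List (List String) × Int) (pq : String × String) :
    segStepA st pq = (segOf pq).foldl segDraw st := by
  unfold segStepA segOf
  rw [parseSegA_eq]
  rcases parsePoint? pq.1 with _ | p <;> rcases parsePoint? pq.2 with _ | q <;> rfl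

theorem foldl_segStepA_eq (l : List (String × String)) (st : List (List String) × Int) :
    l.foldl segStepA st = (l.flatMap segOf).foldl segDraw st := by
  induction l generalizing st with
  | nil => rfl
  | cons pq t ih =>
    rw [List.foldl_cons, List.flatMap_cons, List.foldl_append, ih, segStepA_eq]

theorem lineSegs_eq (line : String) :
    lineSegs line =
      (((PySem.Str.split? line " -> ").getD []).zip ((PySem.Str.split? line " -> ").getD []).tail).flatMap segOf := by
  unfold lineSegs segOf
  rw [PySem.List.foldl_append_eq_flatMap]
  rfl

theorem lineStepA_eq (st : List (List String) × Int) (line : String) :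
    lineStepA st line = (lineSegs line).foldl segDraw st := by
  rw [lineStepA, lineSegs_eq, foldl_segStepA_eq]

theorem allSegs_eq (lines : List String) : allSegs lines = lines.flatMap lineSegs := by
  unfold allSegs
  rw [PySem.List.foldl_append_eq_flatMap]
  rfl

theorem foldl_lineStepA_eq (lines : List String) (st : List (List String) × Int) :
    lines.foldl lineStepA st = (allSegs lines).foldl segDraw st := by
  rw [allSegs_eq]
  induction lines generalizing st with
  | nil => rfl
  | cons line rest ih =>
    rw [List.foldl_cons, List.flatMap_cons, List.foldl_append, ih, lineStepA_eq]

theorem getD_pad {α} (l : List α) (n : Nat) (x d : α) (i : Nat) :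
    (l ++ List.replicate (n - l.length) x).getD i d =
      if i < l.length then l.getD i d else if i < n then x else d := by
  simp only [List.getD_eq_getElem?_getD, List.getElem?_append, List.getElem?_replicate]
  split_ifs <;> simp_all <;> omega

theorem getD_set' {α} (l : List α) (i j : Nat) (v d : α) :
    (l.set i v).getD j d = if i = j ∧ i < l.length then v else l.getD j d := by
  simp only [List.getD_eq_getElem?_getD, List.getElem?_set]
  split_ifs <;> simp_all <;> omega

def RockInv (S : List (Int × Int)) (G : List (List String)) (B : Int) : Prop :=
  (∀ p ∈ S, 0 ≤ p.1 ∧ 0 ≤ p.2 ∧ p.1.toNat < G.length ∧ p.2.toNat < (G.getD p.1.toNat []).length) ∧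
  (∀ rn cn : Nat, rn < G.length → cn < (G.getD rn []).length →
      (G.getD rn []).getD cn "" = (if ((rn : Int), (cn : Int)) ∈ S then pyROCK else pyAIR)) ∧
  (∀ rn : Nat, rn < G.length → (G.getD rn []) ≠ [] →
      ((rn : Int), (((G.getD rn []).length - 1 : Nat) : Int)) ∈ S) ∧
  (G ≠ [] → ∃ c, (((G.length - 1 : Nat) : Int), c) ∈ S) ∧
  (∀ p ∈ S, p.2 ≤ B)

theorem inv_drawCell {S : List (Int × Int)} {G : List (List String)} {B r c : Int}
    (hr : 0 ≤ r) (hc : 0 ≤ c) (hcB : c ≤ B) (h : RockInv S G B) :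
    RockInv (PySem.Set.add S (r, c)) (drawCellA G r c) B := by
  obtain ⟨h1, h2, h3, h4, h5⟩ := h
  unfold drawCellA
  set r0 := r.toNat with hr0
  set c0 := c.toNat with hc0
  have hrt : (r + 1).toNat = r0 + 1 := by omega
  have hct : (c + 1).toNat = c0 + 1 := by omega
  rw [hrt]
  set G1 := G ++ List.replicate (r0 + 1 - G.length) ([] : List String) with hG1
  have hG1len : G1.length = max G.length (r0 + 1) := by
    rw [hG1, List.length_append, List.length_replicate]; omega
  have hG1get : ∀ i : Nat, G1.getD i [] = if i < G.length then G.getD i [] else [] := by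
    intro i
    rw [hG1, getD_pad]
    by_cases e : i < G.length
    · rw [if_pos e, if_pos e]
    · rw [if_neg e, if_neg e]; split_ifs <;> rfl
  set row := G1.getD r0 [] with hrow
  have hrowval : row = if r0 < G.length then G.getD r0 [] else [] := hG1get r0
  rw [hct]
  set row1 := row ++ List.replicate (c0 + 1 - row.length) pyAIR with hrow1
  have hrow1len : row1.length = max row.length (c0 + 1) := by
    rw [hrow1, List.length_append, List.length_replicate]; omega
  have hrow1get : ∀ i : Nat, row1.getD i "" = if i < row.length then row.getD i "" else if i < c0 + 1 then pyAIR else "" := by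
    intro i
    rw [hrow1, getD_pad]
  set rowS := row1.set c0 pyROCK with hrowS
  have hrowSlen : rowS.length = max row.length (c0 + 1) := by rw [hrowS, List.length_set, hrow1len]
  have hc0lt : c0 < row1.length := by rw [hrow1len]; omega
  have hrowSget : ∀ i : Nat, rowS.getD i "" = if i = c0 then pyROCK else row1.getD i "" := by
    intro i
    rw [hrowS, getD_set']
    by_cases e : i = c0
    · rw [if_pos ⟨e.symm, hc0lt⟩, if_pos e]
    · rw [if_neg (by tauto), if_neg e]
  set G2 := G1.set r0 rowS with hG2
  have hr0lt : r0 < G1.length := by rw [hG1len]; omega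
  have hG2len : G2.length = max G.length (r0 + 1) := by rw [hG2, List.length_set, hG1len]
  have hG2get : ∀ i : Nat, G2.getD i [] = if i = r0 then rowS else if i < G.length then G.getD i [] else [] := by
    intro i
    rw [hG2, getD_set']
    by_cases e : i = r0
    · rw [if_pos ⟨e.symm, hr0lt⟩, if_pos e]
    · rw [if_neg (by tauto), if_neg e, hG1get]
  have hmem : ∀ p : Int × Int, p ∈ PySem.Set.add S (r, c) ↔ p ∈ S ∨ p = (r, c) :=
    fun p => PySem.Set.mem_add S (r, c) p
  show RockInv _ G2 B
  refine ⟨?_, ?_, ?_, ?_, ?_⟩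
  · intro p hp
    rcases (hmem p).1 hp with hp | hp
    · obtain ⟨ha, hb, hc', hd⟩ := h1 p hp
      refine ⟨ha, hb, by omega, ?_⟩
      rw [hG2get]
      by_cases e1 : p.1.toNat = r0
      · rw [if_pos e1, hrowSlen]
        have hrw : row = G.getD r0 [] := by rw [hrowval, if_pos (by omega)]
        rw [e1] at hd
        rw [← hrw] at hd
        omega
      · rw [if_neg e1, if_pos hc']
        exact hd
    · subst hp
      refine ⟨hr, hc, by omega, ?_⟩
      rw [hG2get, if_pos rfl, hrowSlen]
      omega
  · intro rn cn hrn hcn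
    rw [hG2get] at hcn ⊢
    by_cases e1 : rn = r0
    · rw [if_pos e1] at hcn ⊢
      rw [hrowSget]
      by_cases e2 : cn = c0
      · rw [if_pos e2, if_pos]
        rcases e1; rcases e2
        rw [hmem]
        right
        rw [Prod.mk.injEq]
        constructor <;> omega
      · rw [if_neg e2, hrow1get]
        by_cases e3 : cn < row.length
        · rw [if_pos e3]
          have hr0n : r0 < G.length := by
            by_contra hh
            rw [hrowval, if_neg hh] at e3; simp at e3
          have hrw : row = G.getD r0 [] := by rw [hrowval, if_pos hr0n]
          rw [hrw] at e3
          rw [hrw, h2 r0 cn hr0n e3]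
          have hiff : (((rn : Int), (cn : Int)) ∈ PySem.Set.add S (r, c)) ↔ (((r0 : Int), (cn : Int)) ∈ S) := by
            rw [e1, hmem]
            constructor
            · rintro (hh | hh)
              · exact hh
              · exfalso; rw [Prod.mk.injEq] at hh; omega
            · exact Or.inl
          rw [if_congr hiff rfl rfl]
        · rw [if_neg e3]
          have hcn' : cn < c0 + 1 := by
            rw [hrowSlen] at hcn; omega
          rw [if_pos hcn', if_neg]
          rw [hmem]
          rintro (hh | hh)
          · obtain ⟨_, _, hlt, hlen⟩ := h1 _ hh
            simp only [Int.toNat_natCast] at hlt hlen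
            rw [e1] at hlt hlen
            rw [hrowval, if_pos hlt] at e3
            omega
          · rw [Prod.mk.injEq] at hh
            omega
    · rw [if_neg e1] at hcn ⊢
      by_cases e2 : rn < G.length
      · rw [if_pos e2] at hcn ⊢
        rw [h2 rn cn e2 hcn]
        have hiff : (((rn : Int), (cn : Int)) ∈ PySem.Set.add S (r, c)) ↔ (((rn : Int), (cn : Int)) ∈ S) := by
          rw [hmem]
          constructor
          · rintro (hh | hh)
            · exact hh
            · exfalso; rw [Prod.mk.injEq] at hh; omega
          · exact Or.inl
        rw [if_congr hiff rfl rfl]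
      · rw [if_neg e2] at hcn; simp at hcn
  · intro rn hrn hne
    rw [hG2get] at hne ⊢
    by_cases e1 : rn = r0
    · rw [if_pos e1] at hne ⊢
      rw [hrowSlen]
      by_cases e2 : row.length < c0 + 1
      · have hmax : max row.length (c0 + 1) - 1 = c0 := by omega
        rw [hmax, hmem, e1]
        right
        rw [Prod.mk.injEq]
        constructor <;> omega
      · have hmax : max row.length (c0 + 1) - 1 = row.length - 1 := by omega
        rw [hmax]
        have hr0n : r0 < G.length := by
          by_contra hh
          rw [hrowval, if_neg hh] at e2; simp at e2
        have hrw : row = G.getD r0 [] := by rw [hrowval, if_pos hr0n]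
        have h3' := h3 r0 hr0n (by rw [← hrw]; intro hh; rw [hh] at e2; simp at e2)
        rw [← hrw] at h3'
        rw [hmem, e1]
        exact Or.inl h3'
    · rw [if_neg e1] at hne ⊢
      by_cases e2 : rn < G.length
      · rw [if_pos e2] at hne ⊢
        rw [hmem]
        exact Or.inl (h3 rn e2 hne)
      · rw [if_neg e2] at hne; simp at hne
  · intro _
    rw [hG2len]
    by_cases e1 : G.length ≤ r0
    · have hmax : max G.length (r0 + 1) - 1 = r0 := by omega
      rw [hmax]
      exact ⟨c, (hmem _).2 (Or.inr (by rw [Prod.mk.injEq]; constructor <;> omega))⟩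
    · have hmax : max G.length (r0 + 1) - 1 = G.length - 1 := by omega
      rw [hmax]
      obtain ⟨c', hc'⟩ := h4 (by intro hh; rw [hh] at e1; simp at e1)
      exact ⟨c', (hmem _).2 (Or.inl hc')⟩
  · intro p hp
    rcases (hmem p).1 hp with hp | hp
    · exact h5 p hp
    · rw [hp]; exact hcB

theorem inv_foldl_draw {f : Int → Int × Int} (l : List Int)
    {S : List (Int × Int)} {G : List (List String)} {B : Int}
    (hf : ∀ x ∈ l, 0 ≤ (f x).1 ∧ 0 ≤ (f x).2 ∧ (f x).2 ≤ B)
    (h : RockInv S G B) :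
    RockInv (l.foldl (fun s x => PySem.Set.add s (f x)) S)
        (l.foldl (fun g x => drawCellA g (f x).1 (f x).2) G) B := by
  induction l generalizing S G with
  | nil => exact h
  | cons x t ih =>
    simp only [List.foldl_cons]
    exact ih (fun y hy => hf y (List.mem_cons_of_mem _ hy))
      (inv_drawCell (hf x (List.mem_cons_self)).1 (hf x (List.mem_cons_self)).2.1
        (hf x (List.mem_cons_self)).2.2 h)

theorem inv_mono_B {S : List (Int × Int)} {G : List (List String)} {B B' : Int} (hB : B ≤ B') (h : RockInv S G B) : RockInv S G B' :=
  ⟨h.1, h.2.1, h.2.2.1, h.2.2.2.1, fun p hp => le_trans (h.2.2.2.2 p hp) hB⟩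

theorem inv_segDraw {sa : List (List String) × Int} {S : PySem.Set (Int × Int)}
    (s : (Int × Int) × (Int × Int))
    (hnn : 0 ≤ s.1.1 ∧ 0 ≤ s.1.2 ∧ 0 ≤ s.2.1 ∧ 0 ≤ s.2.2)
    (h : RockInv S sa.1 sa.2) :
    RockInv ((segCells s).foldl PySem.Set.add S) (segDraw sa s).1 (segDraw sa s).2 := by
  obtain ⟨⟨sc0, sr⟩, ⟨ec0, er⟩⟩ := s
  obtain ⟨hsc0, hsr, hec0, her⟩ := hnn
  replace hsc0 : 0 ≤ sc0 := hsc0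
  replace hsr : 0 ≤ sr := hsr
  replace hec0 : 0 ≤ ec0 := hec0
  replace her : 0 ≤ er := her
  unfold segDraw segCells
  simp only [pySHIFT, sub_zero, ne_eq]
  have hrp : (if sr < er then (sr, er) else (er, sr)) = (min sr er, max sr er) := by
    split_ifs with hlt <;> rw [Prod.mk.injEq] <;> constructor <;> omega
  have hcp : (if sc0 < ec0 then (sc0, ec0) else (ec0, sc0)) = (min sc0 ec0, max sc0 ec0) := by
    split_ifs with hlt <;> rw [Prod.mk.injEq] <;> constructor <;> omega
  rw [hrp, hcp]
  set B' := max (max sa.2 sc0) ec0 with hB'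
  have h0 : RockInv S sa.1 B' := inv_mono_B (by omega) h
  dsimp only
  by_cases hv : sr = er
  · simp only [if_neg (not_not_intro hv), List.nil_append]
    by_cases hh2 : sc0 = ec0
    · simp only [if_neg (not_not_intro hh2), List.foldl_nil]
      exact h0
    · simp only [if_pos hh2, List.foldl_map]
      exact inv_foldl_draw (f := fun col => (min sr er, col)) _
        (fun x hx => by
          rw [PySem.List.mem_pyRange_one] at hx
          dsimp only
          refine ⟨by omega, by omega, by omega⟩) h0
  · simp only [if_pos hv, List.foldl_append, List.foldl_map]
    have h1 := inv_foldl_draw (f := fun row => (row, sc0)) (PySem.List.pyRange (min sr er) (max sr er + 1) 1)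
      (fun x hx => by
        rw [PySem.List.mem_pyRange_one] at hx
        dsimp only
        refine ⟨by omega, by omega, by omega⟩) h0
    by_cases hh2 : sc0 = ec0
    · simp only [if_neg (not_not_intro hh2), List.foldl_nil]
      exact h1
    · simp only [if_pos hh2, List.foldl_map]
      exact inv_foldl_draw (f := fun col => (min sr er, col)) _
        (fun x hx => by
          rw [PySem.List.mem_pyRange_one] at hx
          dsimp only
          refine ⟨by omega, by omega, by omega⟩) h1

theorem inv_segsFold (segs : List ((Int × Int) × (Int × Int)))
    (hnn : ∀ s ∈ segs, 0 ≤ s.1.1 ∧ 0 ≤ s.1.2 ∧ 0 ≤ s.2.1 ∧ 0 ≤ s.2.2)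
    {sa : List (List String) × Int} {S : PySem.Set (Int × Int)}
    (h : RockInv S sa.1 sa.2) :
    RockInv (segs.foldl (fun S s => (segCells s).foldl PySem.Set.add S) S)
        (segs.foldl segDraw sa).1 (segs.foldl segDraw sa).2 := by
  induction segs generalizing sa S with
  | nil => exact h
  | cons s t ih =>
    simp only [List.foldl_cons]
    exact ih (fun x hx => hnn x (List.mem_cons_of_mem _ hx))
      (inv_segDraw s (hnn s List.mem_cons_self) h)

theorem foldl_segDraw_snd (segs : List ((Int × Int) × (Int × Int))) (st : List (List String) × Int) :
    (segs.foldl segDraw st).2 = segs.foldl (fun b s => max (max b s.1.1) s.2.1) st.2 := by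
  induction segs generalizing st with
  | nil => rfl
  | cons s t ih =>
    rw [List.foldl_cons, List.foldl_cons, ih]
    congr 1
    unfold segDraw
    simp [pySHIFT]

theorem foldl_max_init_le (segs : List ((Int × Int) × (Int × Int))) (b : Int) :
    b ≤ segs.foldl (fun b s => max (max b s.1.1) s.2.1) b := by
  induction segs generalizing b with
  | nil => exact le_refl _
  | cons s t ih => exact le_trans (by omega) (ih (max (max b s.1.1) s.2.1))

theorem okPoint_point {p : String} (hp : okPointPre p = true) :
    ∀ q : Int × Int, parsePoint? p = some q → 0 ≤ q.1 ∧ 0 ≤ q.2 := by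
  intro q hq
  unfold okPointPre at hp
  unfold parsePoint? at hq
  rcases hsp : (PySem.Str.split? p ",").getD [] with _ | ⟨x, _ | ⟨y, _ | _⟩⟩ <;>
    rw [hsp] at hp hq <;> dsimp only at hp hq <;> try simp at hp
  rcases hx : PySem.Int.ofStr? x with _ | a <;> rcases hy : PySem.Int.ofStr? y with _ | b <;>
    rw [hx, hy] at hp hq <;> dsimp only at hp hq <;> try simp at hp
  rw [Option.some.injEq] at hq
  subst hq
  exact hp

theorem allSegs_nonneg {lines : List String} (hpre : Pre_input_to_grid lines) :
    ∀ s ∈ allSegs lines, 0 ≤ s.1.1 ∧ 0 ≤ s.1.2 ∧ 0 ≤ s.2.1 ∧ 0 ≤ s.2.2 := by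
  intro s hs
  rw [allSegs_eq, List.mem_flatMap] at hs
  obtain ⟨line, hline, hs⟩ := hs
  rw [lineSegs_eq, List.mem_flatMap] at hs
  obtain ⟨pq, hpq, hs⟩ := hs
  set points := (PySem.Str.split? line " -> ").getD [] with hpts
  have hlen : 2 ≤ points.length := by
    have hz : (points.zip points.tail).length = min points.length points.tail.length := List.length_zip
    have : 0 < (points.zip points.tail).length := List.length_pos_iff.mpr (List.ne_nil_of_mem hpq)
    have ht : points.tail.length = points.length - 1 := List.length_tail
    omega
  have h1 : pq.1 ∈ points := (List.of_mem_zip (by rwa [← Prod.mk.eta (p := pq)] at hpq)).1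
  have h2 : pq.2 ∈ points := List.mem_of_mem_tail (List.of_mem_zip (by rwa [← Prod.mk.eta (p := pq)] at hpq)).2
  have hok1 := hpre line hline hlen pq.1 h1
  have hok2 := hpre line hline hlen pq.2 h2
  unfold segOf at hs
  rcases e1 : parsePoint? pq.1 with _ | p <;> rcases e2 : parsePoint? pq.2 with _ | q <;>
    rw [e1, e2] at hs <;> try exact absurd hs (List.not_mem_nil)
  rcases List.mem_singleton.1 hs with rfl
  obtain ⟨a1, a2⟩ := okPoint_point hok1 p e1
  obtain ⟨b1, b2⟩ := okPoint_point hok2 q e2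
  exact ⟨a1, a2, b1, b2⟩

theorem foldl_setRockB_length (rocks : List (Int × Int)) (G0 : List (List String)) :
    (rocks.foldl setRockB G0).length = G0.length := by
  induction rocks generalizing G0 with
  | nil => rfl
  | cons p t ih => rw [List.foldl_cons, ih, setRockB, List.length_set]

theorem setRockB_getD_len (G0 : List (List String)) (p : Int × Int) (i : Nat) :
    ((setRockB G0 p).getD i []).length = (G0.getD i []).length := by
  rw [setRockB, getD_set']
  split_ifs with e
  · rw [List.length_set, e.1]
  · rfl

theorem foldl_setRockB_getD_len (rocks : List (Int × Int)) (G0 : List (List String)) (i : Nat) :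
    ((rocks.foldl setRockB G0).getD i []).length = (G0.getD i []).length := by
  induction rocks generalizing G0 with
  | nil => rfl
  | cons p t ih => rw [List.foldl_cons, ih, setRockB_getD_len]

theorem foldl_setRockB_cell (rocks : List (Int × Int)) (G0 : List (List String))
    (hb : ∀ p ∈ rocks, 0 ≤ p.1 ∧ 0 ≤ p.2 ∧ p.1.toNat < G0.length ∧ p.2.toNat < (G0.getD p.1.toNat []).length)
    (rn cn : Nat) :
    ((rocks.foldl setRockB G0).getD rn []).getD cn "" =
      if ((rn : Int), (cn : Int)) ∈ rocks then pyROCK else (G0.getD rn []).getD cn "" := by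
  induction rocks generalizing G0 with
  | nil => simp
  | cons p t ih =>
    rw [List.foldl_cons]
    obtain ⟨hp1, hp2, hp3, hp4⟩ := hb p List.mem_cons_self
    have hb' : ∀ q ∈ t, 0 ≤ q.1 ∧ 0 ≤ q.2 ∧ q.1.toNat < (setRockB G0 p).length ∧ q.2.toNat < ((setRockB G0 p).getD q.1.toNat []).length := by
      intro q hq
      obtain ⟨a, b, c, d⟩ := hb q (List.mem_cons_of_mem _ hq)
      refine ⟨a, b, ?_, ?_⟩
      · rw [setRockB, List.length_set]; exact c
      · rw [setRockB_getD_len]; exact d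
    rw [ih _ hb']
    by_cases e1 : ((rn : Int), (cn : Int)) ∈ t
    · rw [if_pos e1, if_pos (List.mem_cons_of_mem _ e1)]
    · rw [if_neg e1]
      have hcell : ((setRockB G0 p).getD rn []).getD cn "" =
          if p.1.toNat = rn ∧ p.2.toNat = cn then pyROCK else (G0.getD rn []).getD cn "" := by
        rw [setRockB, getD_set']
        by_cases e2 : p.1.toNat = rn
        · rw [if_pos ⟨e2, hp3⟩]
          have hp4' : p.2.toNat < (G0.getD rn []).length := by rw [← e2]; exact hp4
          rw [e2, getD_set']
          by_cases e3 : p.2.toNat = cn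
          · rw [if_pos ⟨e3, hp4'⟩, if_pos ⟨rfl, e3⟩]
          · rw [if_neg (by tauto), if_neg (by tauto)]
        · rw [if_neg (by tauto), if_neg (by tauto)]
      rw [hcell]
      by_cases e4 : p = ((rn : Int), (cn : Int))
      · rw [if_pos (by rw [e4]; omega), if_pos (by rw [e4]; exact List.mem_cons_self)]
      · rw [if_neg, if_neg]
        · intro hh
          rcases List.mem_cons.1 hh with hh | hh
          · exact e4 hh.symm
          · exact e1 hh
        · intro hh
          apply e4
          rw [Prod.ext_iff]
          refine ⟨?_, ?_⟩ <;> dsimp <;> omega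

theorem getD_two_nils (j : Nat) : ([[], []] : List (List String)).getD j [] = [] := by
  match j with
  | 0 => rfl
  | 1 => rfl
  | n + 2 => rfl

theorem getD_append_two_nils (G : List (List String)) (i : Nat) :
    (G ++ [[], []]).getD i [] = if i < G.length then G.getD i [] else [] := by
  by_cases e : i < G.length
  · rw [List.getD_append _ _ _ _ e, if_pos e]
  · rw [if_neg e, List.getD_append_right _ _ _ _ (le_of_not_gt e), getD_two_nils]

theorem final_eq {S : List (Int × Int)} {G : List (List String)} {B : Int}
    (hB : 0 ≤ B) (h : RockInv S G B) :
    (G ++ [[], []]).map (fun row : List String => row ++ List.replicate ((B + 500 + 1).toNat - row.length) pyAIR) =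
      S.foldl setRockB
        (List.replicate ((match PySem.List.max? S (fun p => p.1) with
                          | some m => m.1 + 1
                          | none => 0) + 2).toNat
          (List.replicate (B + 500 + 1).toNat pyAIR)) := by
  obtain ⟨h1, h2, h3, h4, h5⟩ := h
  have hGnil : S = [] → G = [] := by
    intro hs
    by_contra hg
    obtain ⟨c, hc⟩ := h4 hg
    rw [hs] at hc
    exact absurd hc (List.not_mem_nil)
  have hN : (match PySem.List.max? S (fun p => p.1) with
             | some m => m.1 + 1
             | none => 0) = (G.length : Int) := by
    cases hmx : PySem.List.max? S (fun p => p.1) with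
    | none =>
      rw [PySem.List.max?_eq_none_iff] at hmx
      rw [hGnil hmx]
      rfl
    | some m =>
      have hm : m ∈ S := PySem.List.max?_mem hmx
      have hmax := PySem.List.max?_isMax hmx
      obtain ⟨ha1, ha2, ha3, ha4⟩ := h1 m hm
      have hGne : G ≠ [] := by
        intro hg
        rw [hg] at ha3
        simp at ha3
      obtain ⟨c', hc'⟩ := h4 hGne
      have hle := hmax _ hc'
      dsimp only at hle
      have hGlen : 0 < G.length := List.length_pos_iff.mpr hGne
      obtain ⟨m1, m2⟩ := m
      show m1 + 1 = (G.length : ℤ)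
      dsimp only at *
      omega
  rw [hN]
  set W := (B + 500 + 1).toNat with hW
  have hWval : W = B.toNat + 501 := by omega
  set N := (((G.length : Int)) + 2).toNat with hNn
  have hNval : N = G.length + 2 := by omega
  set G0 := List.replicate N (List.replicate W pyAIR) with hG0
  have hG0len : G0.length = N := by rw [hG0, List.length_replicate]
  have hG0get : ∀ i : Nat, i < N → G0.getD i [] = List.replicate W pyAIR := by
    intro i hi
    rw [hG0, List.getD_replicate _ hi]
  have hb : ∀ p ∈ S, 0 ≤ p.1 ∧ 0 ≤ p.2 ∧ p.1.toNat < G0.length ∧ p.2.toNat < (G0.getD p.1.toNat []).length := by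
    intro p hp
    obtain ⟨a, b, c, d⟩ := h1 p hp
    have hpB := h5 p hp
    have hlt : p.1.toNat < N := by omega
    refine ⟨a, b, by omega, ?_⟩
    rw [hG0get _ hlt, List.length_replicate]
    omega
  have hrowlen : ∀ i : Nat, i < G.length → (G.getD i []).length ≤ W := by
    intro i hi
    by_cases e : G.getD i [] = []
    · rw [e]; simp
    · have hmem := h3 i hi e
      obtain ⟨a, b, c, d⟩ := h1 _ hmem
      have hcB := h5 _ hmem
      dsimp only at *
      omega
  have hnotmem : ∀ (rn cn : Nat), (¬ rn < G.length ∨ ¬ cn < (G.getD rn []).length) → ((rn : Int), (cn : Int)) ∉ S := by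
    intro rn cn hcase hmem
    obtain ⟨a, b, c, d⟩ := h1 _ hmem
    simp only [Int.toNat_natCast] at c d
    rcases hcase with hc | hc <;> exact hc (by omega)
  apply List.ext_getElem
  · rw [List.length_map, List.length_append, foldl_setRockB_length, hG0len]
    simp [hNval]
  · intro i hi1 hi2
    rw [List.length_map, List.length_append] at hi1
    simp only [List.length_cons, List.length_nil] at hi1
    have hiN : i < N := by rw [foldl_setRockB_length, hG0len] at hi2; exact hi2
    rw [List.getElem_map]
    have hia : i < (G ++ [[], []]).length := by simp; omega
    have hib : i < (S.foldl setRockB G0).length := by rw [foldl_setRockB_length, hG0len]; exact hiN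
    rw [show (G ++ [[], []])[i]'hia = (G ++ [[], []]).getD i [] from (List.getD_eq_getElem _ _ hia).symm]
    rw [show (S.foldl setRockB G0)[i]'hib = (S.foldl setRockB G0).getD i [] from (List.getD_eq_getElem _ _ hib).symm]
    rw [getD_append_two_nils]
    set Ri := if i < G.length then G.getD i [] else [] with hRi
    have hRilen : Ri.length ≤ W := by
      rw [hRi]
      split_ifs with e
      · exact hrowlen i e
      · simp
    apply List.ext_getElem
    · rw [List.length_append, List.length_replicate, foldl_setRockB_getD_len, hG0get _ hiN, List.length_replicate]
      omega
    · intro j hj1 hj2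
      rw [List.length_append, List.length_replicate] at hj1
      have hjW : j < W := by
        rw [foldl_setRockB_getD_len, hG0get _ hiN, List.length_replicate] at hj2
        exact hj2
      have hja : j < (Ri ++ List.replicate (W - Ri.length) pyAIR).length := by simp; omega
      rw [show (Ri ++ List.replicate (W - Ri.length) pyAIR)[j]'hja =
            (Ri ++ List.replicate (W - Ri.length) pyAIR).getD j "" from (List.getD_eq_getElem _ _ hja).symm]
      rw [show ((S.foldl setRockB G0).getD i [])[j]'hj2 = ((S.foldl setRockB G0).getD i []).getD j "" from
        (List.getD_eq_getElem _ _ hj2).symm]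
      rw [getD_pad, foldl_setRockB_cell S G0 hb i j]
      have hG0cell : (G0.getD i []).getD j "" = pyAIR := by
        rw [hG0get _ hiN, List.getD_replicate _ hjW]
      rw [hG0cell]
      by_cases e1 : j < Ri.length
      · rw [if_pos e1]
        have hiG : i < G.length := by
          by_contra hh
          rw [hRi, if_neg hh] at e1
          simp at e1
        have hRig : Ri = G.getD i [] := by rw [hRi, if_pos hiG]
        rw [hRig, h2 i j hiG (by rw [← hRig]; exact e1)]
      · rw [if_neg e1, if_pos hjW]
        rw [if_neg]
        by_cases hiG : i < G.length
        · refine hnotmem i j (Or.inr ?_)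
          rw [hRi, if_pos hiG] at e1
          exact e1
        · exact hnotmem i j (Or.inl hiG)


-- ===== VERDICT (by name: the statement is the Claim_ definition above) =====
theorem input_to_grid_spec : Claim_equal_input_to_grid := by
  intro lines _ hpre
  unfold Spec_input_to_grid
  have h0 : RockInv (PySem.Set.ofList ([] : List (Int × Int))) ([] : List (List String)) 0 := by
    refine ⟨?_, ?_, ?_, ?_, ?_⟩ <;> simp [PySem.Set.ofList]
  have hnn := allSegs_nonneg hpre
  have hinv := inv_segsFold (allSegs lines) hnn
    (sa := (([], 0) : List (List String) × Int)) (S := PySem.Set.ofList []) h0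
  have hsnd : ((allSegs lines).foldl segDraw (([], 0) : List (List String) × Int)).2 = biggestCol (allSegs lines) := by
    rw [foldl_segDraw_snd]; rfl
  have hBnn : 0 ≤ ((allSegs lines).foldl segDraw (([], 0) : List (List String) × Int)).2 := by
    rw [foldl_segDraw_snd]; exact foldl_max_init_le _ 0
  have hfe := final_eq hBnn hinv
  simp only [input_to_grid, input_to_grid_alt]
  rw [foldl_lineStepA_eq]
  rw [← hsnd]
  exact hfe
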